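-- pv_equiv track=rewrite | github.com/ojshj/duoduo_git | python/prime_ring.py | GetPrimeDic
-- ===== SOURCE A (Python) =====
-- def IsPrimeNum(num):
--     for i in range(2, num):
--         if num % i == 0:
--             return False
--     return True
--
-- def GetPrimeDic(n):
--     Dic = {}
--     for i in range(1, n + 1):
--         Dic[i] = []
--
--     for i in range(1, n + 1, 2):
--         # even number
--         for j in range(2, n + 1, 2):
--             # odd number
--             if IsPrimeNum(i + j):
--                 assert (j not in Dic[i])
--                 # {1:[2, 4, ...]}
--                 Dic[i] += [j]
--
--                 assert (i not in Dic[j])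
--                 # {2:[1, 5, ...]}
--                 Dic[j] += [i]
--     return Dic
-- ===== SOURCE B (Python) =====
-- def GetPrimeDic(n):
--     # Precompute the set of odd prime sums once (trial division by odd
--     # candidates only), then build each key's partner list directly.
--     prime_sums = set()
--     for s in range(3, 2 * n, 2):
--         if all(s % d for d in range(3, s, 2)):
--             prime_sums.add(s)
--     return {k: [m for m in range(1 + k % 2, n + 1, 2) if k + m in prime_sums]
--             for k in range(1, n + 1)}
-- ===== Notes on version B (the rewrite author's own statement) =====
-- stated objective: faster
-- what changed: Replaces the triple-nested loop (per-pair trial division over all divisors, with dual dict appends) by a one-time precomputed set of odd prime sums (trial division by odd candidates only, each sum tested once) and a direct per-key comprehension over the opposite-parity range.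
import Mathlib
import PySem

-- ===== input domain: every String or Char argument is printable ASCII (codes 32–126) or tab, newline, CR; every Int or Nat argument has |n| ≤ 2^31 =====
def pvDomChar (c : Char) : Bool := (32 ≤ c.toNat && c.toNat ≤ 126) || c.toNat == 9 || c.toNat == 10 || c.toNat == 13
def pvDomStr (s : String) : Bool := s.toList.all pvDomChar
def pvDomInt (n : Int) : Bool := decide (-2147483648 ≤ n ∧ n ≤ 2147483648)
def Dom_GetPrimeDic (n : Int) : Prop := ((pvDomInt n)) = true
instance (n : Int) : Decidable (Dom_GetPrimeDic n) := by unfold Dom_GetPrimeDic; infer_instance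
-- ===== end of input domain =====

-- B replaces A's triple-nested loop by a precomputed set of odd prime sums plus a
-- direct per-key comprehension (objective: faster; A is O(n^3), B is O(n^2)).

-- ===== PORT A =====
def IsPrimeNum (num : Int) : Bool :=
  -- 'for i in range(2, num): if num % i == 0: return False' / 'return True'
  (PySem.List.pyRange 2 num 1).all (fun i => !(PySem.Int.mod num i == 0))

def GetPrimeDic (n : Int) : List (Int × List Int) :=
  let dic0 : PySem.Dict Int (List Int) :=
    (PySem.List.pyRange 1 (n + 1) 1).foldl (fun d i => d.insert i []) PySem.Dict.empty
  let dic :=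
    (PySem.List.pyRange 1 (n + 1) 2).foldl (fun d i =>
      (PySem.List.pyRange 2 (n + 1) 2).foldl (fun d j =>
        if IsPrimeNum (i + j) then
          -- Dic[i] += [j]; Dic[j] += [i]  (i, j are always existing keys, so getD is exact;
          -- the asserts never fire: each unordered pair is visited exactly once)
          let d1 := d.insert i (d.getD i [] ++ [j])
          d1.insert j (d1.getD j [] ++ [i])
        else d) d) dic0
  dic.items

-- ===== PORT B =====
def GetPrimeDic_alt (n : Int) : List (Int × List Int) :=
  let primeSums : PySem.Set Int :=
    (PySem.List.pyRange 3 (2 * n) 2).foldl (fun ps s =>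
      if (PySem.List.pyRange 3 s 2).all (fun d => !(PySem.Int.mod s d == 0)) then
        PySem.Set.add ps s
      else ps) PySem.Set.empty
  -- dict comprehension over the distinct fresh keys 1..n ports as a map
  (PySem.List.pyRange 1 (n + 1) 1).map (fun k =>
    (k, (PySem.List.pyRange (1 + PySem.Int.mod k 2) (n + 1) 2).filter
          (fun m => PySem.Set.contains primeSums (k + m))))

-- ===== PRECONDITION & SPEC =====
def Spec_GetPrimeDic (n : Int) (out : List (Int × List Int)) : Prop := out = GetPrimeDic_alt n
instance (n : Int) (out : List (Int × List Int)) : Decidable (Spec_GetPrimeDic n out) := by unfold Spec_GetPrimeDic; infer_instance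

-- ===== CLAIM (what is proved, stated in full; the proofs are below) =====
def Claim_equal_GetPrimeDic : Prop := ∀ (n : Int), Dom_GetPrimeDic n → Spec_GetPrimeDic n (GetPrimeDic n)

-- ===== LEMMAS AND PROOFS =====

theorem nodup_pyRange_two (a b : Int) : (PySem.List.pyRange a b 2).Nodup := by
  rw [PySem.List.pyRange_of_pos a b (by norm_num)]
  exact List.Nodup.map (fun x y h => by omega) List.nodup_range

-- for odd s ≥ 3, trial division over [2, s) decides like trial division over the odd d in [3, s)
theorem all_div_odd (s : Int) (hs : s % 2 = 1) :
    (PySem.List.pyRange 2 s 1).all (fun i => !(PySem.Int.mod s i == 0)) =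
    (PySem.List.pyRange 3 s 2).all (fun d => !(PySem.Int.mod s d == 0)) := by
  rw [Bool.eq_iff_iff]
  simp only [List.all_eq_true, Bool.not_eq_eq_eq_not, Bool.not_true, beq_eq_false_iff_ne, ne_eq]
  constructor
  · intro h d hd
    apply h
    rw [PySem.List.mem_pyRange_iff_of_pos (by norm_num)] at hd
    rw [PySem.List.mem_pyRange_one]
    omega
  · intro h d hd hmod
    rw [PySem.List.mem_pyRange_one] at hd
    rw [PySem.Int.mod_eq_zero_iff_dvd] at hmod
    rcases Int.emod_two_eq_zero_or_one d with hpar | hpar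
    · have h2 : (2:Int) ∣ s := dvd_trans ⟨d / 2, by omega⟩ hmod
      omega
    · exact h d (by rw [PySem.List.mem_pyRange_iff_of_pos (by norm_num)]; omega)
        (by rw [PySem.Int.mod_eq_zero_iff_dvd]; exact hmod)

-- B's prime-sum set build is set(filter(test, range))
theorem primeSums_eq (n : Int) :
    ((PySem.List.pyRange 3 (2 * n) 2).foldl (fun ps s =>
      if (PySem.List.pyRange 3 s 2).all (fun d => !(PySem.Int.mod s d == 0)) then
        PySem.Set.add ps s
      else ps) PySem.Set.empty)
    = PySem.Set.ofList ((PySem.List.pyRange 3 (2 * n) 2).filter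
        (fun s => (PySem.List.pyRange 3 s 2).all (fun d => !(PySem.Int.mod s d == 0)))) := by
  rw [PySem.List.foldl_if_eq_foldl_filter, PySem.Set.ofList_eq_foldl]
  rfl

-- membership in B's prime-sum set is exactly A's primality test, for the odd sums that occur
theorem contains_primeSums (n s : Int) (h3 : 3 ≤ s) (hlt : s < 2 * n) (hodd : s % 2 = 1) :
    PySem.Set.contains
      ((PySem.List.pyRange 3 (2 * n) 2).foldl (fun ps s =>
        if (PySem.List.pyRange 3 s 2).all (fun d => !(PySem.Int.mod s d == 0)) then
          PySem.Set.add ps s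
        else ps) PySem.Set.empty) s = IsPrimeNum s := by
  rw [primeSums_eq, Bool.eq_iff_iff, PySem.Set.contains_iff, PySem.Set.mem_ofList,
    List.mem_filter, IsPrimeNum, all_div_odd s hodd]
  have hmem : s ∈ PySem.List.pyRange 3 (2 * n) 2 := by
    rw [PySem.List.mem_pyRange_iff_of_pos (by norm_num)]
    omega
  simp [hmem]

def stepIn (p : Int → Bool) (i : Int) (d : PySem.Dict Int (List Int)) (j : Int) :
    PySem.Dict Int (List Int) :=
  if p j then
    let d1 := d.insert i (d.getD i [] ++ [j])
    d1.insert j (d1.getD j [] ++ [i])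
  else d

theorem inner_loop (p : Int → Bool) (i : Int) (J : List Int) (d : PySem.Dict Int (List Int))
    (hnd : J.Nodup) (hiJ : i ∉ J) (hci : d.contains i = true)
    (hcJ : ∀ j ∈ J, d.contains j = true) :
    (J.foldl (stepIn p i) d).keys = d.keys ∧
    ∀ x, (J.foldl (stepIn p i) d).getD x [] =
      if x = i then d.getD i [] ++ J.filter p
      else if x ∈ J ∧ p x = true then d.getD x [] ++ [i]
      else d.getD x [] := by
  induction J generalizing d with
  | nil =>
      refine ⟨rfl, fun x => ?_⟩
      rcases eq_or_ne x i with h | h <;> simp [h]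
  | cons j J' ih =>
      have hij : i ≠ j := fun h => hiJ (h ▸ List.mem_cons_self)
      have hjJ' : j ∉ J' := (List.nodup_cons.mp hnd).1
      have hiJ' : i ∉ J' := fun h => hiJ (List.mem_cons_of_mem _ h)
      simp only [List.foldl_cons]
      by_cases hp : p j = true
      · have hstep : stepIn p i d j =
            (d.insert i (d.getD i [] ++ [j])).insert j (d.getD j [] ++ [i]) := by
          simp only [stepIn, hp, if_true]
          rw [PySem.Dict.getD_insert]
          simp [Ne.symm hij]
        rw [hstep]
        set d2 := (d.insert i (d.getD i [] ++ [j])).insert j (d.getD j [] ++ [i]) with hd2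
        have hkeys2 : d2.keys = d.keys := by
          rw [hd2, PySem.Dict.keys_insert_of_contains, PySem.Dict.keys_insert_of_contains _ _ hci]
          rw [PySem.Dict.contains_insert, hcJ j List.mem_cons_self]
          simp
        have hcont2 : ∀ y, d2.contains y = d.contains y := by
          intro y
          rcases h : d.contains y with hf | ht
          · rw [← Bool.not_eq_true] at h ⊢
            rw [PySem.Dict.contains_iff_mem_keys, hkeys2, ← PySem.Dict.contains_iff_mem_keys] at *
            exact h
          · rw [PySem.Dict.contains_iff_mem_keys, hkeys2, ← PySem.Dict.contains_iff_mem_keys]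
            exact h
        have hgetD2 : ∀ y, d2.getD y [] =
            if y = j then d.getD j [] ++ [i]
            else if y = i then d.getD i [] ++ [j]
            else d.getD y [] := by
          intro y
          rw [hd2, PySem.Dict.getD_insert, PySem.Dict.getD_insert]
        obtain ⟨ihk, ihg⟩ := ih d2 (List.nodup_cons.mp hnd).2 hiJ'
          (by rw [hcont2]; exact hci)
          (fun y hy => by rw [hcont2]; exact hcJ y (List.mem_cons_of_mem _ hy))
        refine ⟨ihk.trans hkeys2, fun x => ?_⟩
        rw [ihg x]
        by_cases hxi : x = i
        · simp only [hxi, hgetD2, if_neg hij, List.filter_cons, hp]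
          simp
        · by_cases hxj : x = j
          · simp only [hgetD2, hxj]
            simp [hjJ', hp, Ne.symm hij]
          · simp only [if_neg hxi, hgetD2, if_neg hxj, List.mem_cons]
            simp [hxj]
      · have hstep : stepIn p i d j = d := by simp [stepIn, hp]
        rw [hstep]
        obtain ⟨ihk, ihg⟩ := ih d (List.nodup_cons.mp hnd).2 hiJ' hci
          (fun y hy => hcJ y (List.mem_cons_of_mem _ hy))
        refine ⟨ihk, fun x => ?_⟩
        rw [ihg x]
        simp only [List.filter_cons, hp, List.mem_cons]
        by_cases hxi : x = i
        · simp [hxi]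
        · by_cases hxj : x = j
          · simp [hxj, Bool.of_not_eq_true hp]
          · simp [hxi, hxj]

theorem outer_loop (f : Int → Int → Bool) (J I : List Int) (d : PySem.Dict Int (List Int))
    (hndI : I.Nodup) (hndJ : J.Nodup) (hdisj : ∀ x ∈ I, x ∉ J)
    (hcI : ∀ i ∈ I, d.contains i = true) (hcJ : ∀ j ∈ J, d.contains j = true) :
    (I.foldl (fun d i => J.foldl (stepIn (fun j => f i j) i) d) d).keys = d.keys ∧
    ∀ x, (I.foldl (fun d i => J.foldl (stepIn (fun j => f i j) i) d) d).getD x [] =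
      if x ∈ I then d.getD x [] ++ J.filter (fun j => f x j)
      else if x ∈ J then d.getD x [] ++ I.filter (fun i => f i x)
      else d.getD x [] := by
  induction I generalizing d with
  | nil =>
      refine ⟨rfl, fun x => ?_⟩
      rcases h : decide (x ∈ J) with hf | ht <;> simp_all
  | cons i I' ih =>
      have hiI' : i ∉ I' := (List.nodup_cons.mp hndI).1
      have hiJ : i ∉ J := hdisj i List.mem_cons_self
      simp only [List.foldl_cons]
      obtain ⟨ik, ig⟩ := inner_loop (fun j => f i j) i J d hndJ hiJ
        (hcI i List.mem_cons_self) hcJ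
      set d1 := J.foldl (stepIn (fun j => f i j) i) d with hd1
      have hcont1 : ∀ y, d1.contains y = d.contains y := by
        intro y
        rcases h : d.contains y with hf | ht
        · rw [← Bool.not_eq_true] at h ⊢
          rw [PySem.Dict.contains_iff_mem_keys, ik, ← PySem.Dict.contains_iff_mem_keys] at *
          exact h
        · rw [PySem.Dict.contains_iff_mem_keys, ik, ← PySem.Dict.contains_iff_mem_keys]
          exact h
      obtain ⟨ihk, ihg⟩ := ih d1 (List.nodup_cons.mp hndI).2
        (fun x hx => hdisj x (List.mem_cons_of_mem _ hx))
        (fun y hy => by rw [hcont1]; exact hcI y (List.mem_cons_of_mem _ hy))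
        (fun y hy => by rw [hcont1]; exact hcJ y hy)
      refine ⟨ihk.trans ik, fun x => ?_⟩
      rw [ihg x]
      by_cases hxi : x = i
      · simp [hxi, hiI', hiJ, ig]
      · by_cases hxI' : x ∈ I'
        · have hxJ : x ∉ J := hdisj x (List.mem_cons_of_mem _ hxI')
          simp only [if_pos hxI', ig x, if_neg hxi, List.mem_cons]
          simp [hxI', hxJ, hxi]
        · by_cases hxJ : x ∈ J
          · simp only [if_neg hxI', if_pos hxJ, ig x, if_neg hxi, List.mem_cons, List.filter_cons]
            by_cases hfx : f i x = true
            · simp [hxJ, hfx, hxi, hxI']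
            · simp [hxJ, hxi, hxI', Bool.of_not_eq_true hfx]
          · simp only [if_neg hxI', if_neg hxJ, ig x, if_neg hxi, List.mem_cons]
            simp [hxJ, hxi, hxI']

theorem getD_init (l : List Int) (d : PySem.Dict Int (List Int))
    (h : ∀ x, d.getD x [] = []) (x : Int) :
    (l.foldl (fun d i => d.insert i []) d).getD x [] = [] := by
  induction l generalizing d with
  | nil => exact h x
  | cons a t ih =>
      simp only [List.foldl_cons]
      exact ih _ (fun y => by rw [PySem.Dict.getD_insert]; split <;> simp [h])

theorem GetPrimeDic_eq (n : Int) : GetPrimeDic n = GetPrimeDic_alt n := by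
  simp only [GetPrimeDic, GetPrimeDic_alt]
  -- name the three ranges
  set R := PySem.List.pyRange 1 (n + 1) 1 with hR
  set I := PySem.List.pyRange 1 (n + 1) 2 with hI
  set J := PySem.List.pyRange 2 (n + 1) 2 with hJ
  set dic0 := R.foldl (fun d i => d.insert i []) PySem.Dict.empty with hdic0
  -- the nested loop of A is the stepIn/outer_loop shape
  have hbody : (fun (d : PySem.Dict Int (List Int)) (i : Int) =>
      J.foldl (fun d j =>
        if IsPrimeNum (i + j) then
          let d1 := d.insert i (d.getD i [] ++ [j])
          d1.insert j (d1.getD j [] ++ [i])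
        else d) d)
      = (fun d i => J.foldl (stepIn (fun j => IsPrimeNum (i + j)) i) d) := rfl
  rw [hbody]
  -- initial dict: keys = R, every value [] (also for absent keys, since the default is [])
  have hkeys0 : dic0.keys = R := by
    rw [hdic0, PySem.Dict.keys_foldl_insert (f := fun _ _ => ([] : List Int))]
    rw [PySem.Dict.keys_empty, PySem.Set.update_nil_left,
      PySem.Set.ofList_eq_self_of_nodup R (PySem.List.nodup_pyRange_one 1 (n + 1))]
  have hgetD0 : ∀ x, dic0.getD x [] = [] :=
    getD_init R PySem.Dict.empty (fun x => PySem.Dict.getD_empty x [])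
  have hcont0 : ∀ x, x ∈ R → dic0.contains x = true := by
    intro x hx
    rw [PySem.Dict.contains_iff_mem_keys, hkeys0]
    exact hx
  -- membership facts for the stepped ranges
  have hmemI : ∀ x, x ∈ I ↔ 1 ≤ x ∧ x < n + 1 ∧ (2:Int) ∣ x - 1 := fun x => by
    rw [hI, PySem.List.mem_pyRange_iff_of_pos (by norm_num)]
  have hmemJ : ∀ x, x ∈ J ↔ 2 ≤ x ∧ x < n + 1 ∧ (2:Int) ∣ x - 2 := fun x => by
    rw [hJ, PySem.List.mem_pyRange_iff_of_pos (by norm_num)]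
  have hIR : ∀ x ∈ I, x ∈ R := by
    intro x hx
    rw [hmemI] at hx
    rw [hR, PySem.List.mem_pyRange_one]
    omega
  have hJR : ∀ x ∈ J, x ∈ R := by
    intro x hx
    rw [hmemJ] at hx
    rw [hR, PySem.List.mem_pyRange_one]
    omega
  have hdisj : ∀ x ∈ I, x ∉ J := by
    intro x hx hx'
    rw [hmemI] at hx
    rw [hmemJ] at hx'
    omega
  obtain ⟨hk, hg⟩ := outer_loop (fun i j => IsPrimeNum (i + j)) J I dic0
    (nodup_pyRange_two 1 (n + 1)) (nodup_pyRange_two 2 (n + 1)) hdisj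
    (fun i hi => hcont0 i (hIR i hi)) (fun j hj => hcont0 j (hJR j hj))
  set dic := I.foldl (fun d i => J.foldl (stepIn (fun j => IsPrimeNum (i + j)) i) d) dic0 with hdic
  -- items of the final dict, key by key
  rw [PySem.Dict.items_eq_map_keys dic (by rw [hk, hkeys0]; exact PySem.List.nodup_pyRange_one 1 (n + 1)) [],
    hk, hkeys0]
  apply List.map_congr_left
  intro k hkR
  have hkb : 1 ≤ k ∧ k < n + 1 := by
    rw [hR, PySem.List.mem_pyRange_one] at hkR
    exact hkR
  rcases Int.emod_two_eq_zero_or_one k with hpar | hpar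
  · -- k even: k was filled by the inner inserts, its partners are the odd i with prime i + k
    have hkJ : k ∈ J := by rw [hmemJ]; omega
    have hkI : k ∉ I := fun h => hdisj k h hkJ
    have hmod : PySem.Int.mod k 2 = 0 := by
      rw [PySem.Int.mod_eq_emod_of_pos (by norm_num : (0:Int) < 2)]; omega
    rw [hg k, if_neg hkI, if_pos hkJ, hgetD0, hmod]
    simp only [List.nil_append]
    have : (1 : Int) + 0 = 1 := by norm_num
    rw [this, ← hI]
    refine congrArg (Prod.mk k) ?_
    apply List.filter_congr
    intro m hm
    rw [hmemI] at hm
    rw [Int.add_comm k m]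
    exact (contains_primeSums n (m + k) (by omega) (by omega) (by omega)).symm
  · -- k odd: k was filled by its own outer iteration, partners are the even j with prime k + j
    have hkI : k ∈ I := by rw [hmemI]; omega
    have hmod : PySem.Int.mod k 2 = 1 := by
      rw [PySem.Int.mod_eq_emod_of_pos (by norm_num : (0:Int) < 2)]; omega
    rw [hg k, if_pos hkI, hgetD0, hmod]
    simp only [List.nil_append]
    have : (1 : Int) + 1 = 2 := by norm_num
    rw [this, ← hJ]
    refine congrArg (Prod.mk k) ?_
    apply List.filter_congr
    intro m hm
    rw [hmemJ] at hm
    exact (contains_primeSums n (k + m) (by omega) (by omega) (by omega)).symm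

-- ===== VERDICT (by name: the statement is the Claim_ definition above) =====
theorem GetPrimeDic_spec : Claim_equal_GetPrimeDic := by
  intro n _
  unfold Spec_GetPrimeDic
  exact GetPrimeDic_eq n
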